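-- pv_equiv track=rewrite | github.com/colored-dye/musicfeature | src/parse_input.py | tonality_to_root_note
-- ===== SOURCE A (Python) =====
-- def tonality_to_root_note(tonality: str, pitch: int) -> int:
--     """获取一个MIDI音符在某调性下的根音
--     """
--     MIDDLE = {
--         'C' : 60,
--         'D' : 62,
--         'E' : 64,
--         'F' : 65,
--         'G' : 67,
--         'A' : 69,
--         'B' : 71,
--     }
--     note_name, _ = tonality.split('.') # 大/小调不管, 只看根音
--     if len(note_name) == 1:
--         root = MIDDLE[note_name]
--     else:
--         # 有降调, 'B', 如DB.MAJOR
--         root = MIDDLE[note_name[0]] - 1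
--     while root > pitch:
--         root -= 12
--     return root
-- ===== SOURCE B (Python) =====
-- def tonality_to_root_note(tonality: str, pitch: int) -> int:
--     """Same lookup as A, but the octave drop is one closed-form step instead of a loop."""
--     MIDDLE = {
--         'C' : 60,
--         'D' : 62,
--         'E' : 64,
--         'F' : 65,
--         'G' : 67,
--         'A' : 69,
--         'B' : 71,
--     }
--     note_name, _ = tonality.split('.')
--     if len(note_name) == 1:
--         root = MIDDLE[note_name]
--     else:
--         root = MIDDLE[note_name[0]] - 1
--     return root - 12 * max(0, (root - pitch + 11) // 12)
-- ===== Notes on version B (the rewrite author's own statement) =====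
-- stated objective: faster
-- what changed: The 'while root > pitch: root -= 12' loop is replaced by one closed-form arithmetic step root -= 12*max(0,(root-pitch+11)//12).
import Mathlib
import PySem

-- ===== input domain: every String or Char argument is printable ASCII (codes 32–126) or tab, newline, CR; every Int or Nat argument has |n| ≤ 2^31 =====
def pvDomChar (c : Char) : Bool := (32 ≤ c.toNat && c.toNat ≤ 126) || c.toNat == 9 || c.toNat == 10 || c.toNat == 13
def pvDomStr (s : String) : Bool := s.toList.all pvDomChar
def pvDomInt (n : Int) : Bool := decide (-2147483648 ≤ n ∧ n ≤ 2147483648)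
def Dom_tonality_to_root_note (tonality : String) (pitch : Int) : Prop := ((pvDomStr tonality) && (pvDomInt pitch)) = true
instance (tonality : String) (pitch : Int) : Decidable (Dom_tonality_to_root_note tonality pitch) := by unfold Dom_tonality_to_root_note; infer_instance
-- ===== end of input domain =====

-- B replaces A's decrement-by-12 loop with one closed-form arithmetic step (asymptotically faster).

-- ===== PORT A =====
def pvMiddle : PySem.Dict String Int :=
  PySem.Dict.mk [("C", 60), ("D", 62), ("E", 64), ("F", 65), ("G", 67), ("A", 69), ("B", 71)]

-- 'while root > pitch: root -= 12'
def pvLoopA (root pitch : Int) : Int :=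
  if root > pitch then pvLoopA (root - 12) pitch else root
termination_by (root - pitch).toNat
decreasing_by omega

def tonality_to_root_note (tonality : String) (pitch : Int) : Int :=
  match PySem.Str.split? tonality "." with
  | some [note_name, _] =>
    let root : Int :=
      if PySem.Str.len note_name = 1 then (pvMiddle.get? note_name).getD 0
      else
        match PySem.Str.pyGet? note_name 0 with
        | some c => (pvMiddle.get? (String.ofList [c])).getD 0 - 1
        | none => 0  -- Python raises IndexError here; outside Pre_
    pvLoopA root pitch
  | _ => 0  -- Python raises ValueError (unpacking); outside Pre_

-- ===== PORT B =====
def pvMiddleB : List (String × Int) :=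
  [("C", 60), ("D", 62), ("E", 64), ("F", 65), ("G", 67), ("A", 69), ("B", 71)]

def tonality_to_root_note_alt (tonality : String) (pitch : Int) : Int :=
  -- 'note_name, _ = tonality.split('.')': exactly two parts (else ValueError, outside Pre_)
  let parts := (PySem.Str.split? tonality ".").getD []
  if parts.length == 2 then
    let note_name := parts.headD ""
    let root : Int :=
      if PySem.Str.len note_name = 1 then ((PySem.Dict.mk pvMiddleB).get? note_name).getD 0
      else  -- note_name[0]: none = IndexError, outside Pre_
        (PySem.Str.pyGet? note_name 0).elim 0
          (fun c => ((PySem.Dict.mk pvMiddleB).get? (String.ofList [c])).getD 0 - 1)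
    root - 12 * max 0 (PySem.Int.floordiv (root - pitch + 11) 12)
  else 0

-- ===== PRECONDITION & SPEC =====
-- Pre_ excludes exactly the inputs where Python A raises: tonality must contain exactly one '.'
-- (else the 2-tuple unpacking raises ValueError), the part before it must be nonempty (else
-- IndexError), and the looked-up key must be in the MIDDLE dict (else KeyError).
def pvPreCheck (tonality : String) : Bool :=
  let parts := (PySem.Str.split? tonality ".").getD []
  let n := (parts.headD "").toList
  parts.length == 2 &&
    (if n.length == 1 then decide (n ∈ [['C'], ['D'], ['E'], ['F'], ['G'], ['A'], ['B']])
     else !n.isEmpty && decide (n.headD ' ' ∈ ['C', 'D', 'E', 'F', 'G', 'A', 'B']))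

def Pre_tonality_to_root_note (tonality : String) (pitch : Int) : Prop :=
  pvPreCheck tonality = true
instance (tonality : String) (pitch : Int) : Decidable (Pre_tonality_to_root_note tonality pitch) := by
  unfold Pre_tonality_to_root_note; infer_instance

def pvWitness_tonality_to_root_note : String × Int := ("DB.MAJOR", 40)

def Spec_tonality_to_root_note (tonality : String) (pitch : Int) (out : Int) : Prop := out = tonality_to_root_note_alt tonality pitch
instance (tonality : String) (pitch : Int) (out : Int) : Decidable (Spec_tonality_to_root_note tonality pitch out) := by unfold Spec_tonality_to_root_note; infer_instance

-- ===== CLAIM (what is proved, stated in full; the proofs are below) =====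
def Claim_equal_tonality_to_root_note : Prop := ∀ (tonality : String) (pitch : Int), Dom_tonality_to_root_note tonality pitch → Pre_tonality_to_root_note tonality pitch → Spec_tonality_to_root_note tonality pitch (tonality_to_root_note tonality pitch)

-- ===== LEMMAS AND PROOFS =====

-- The loop of A equals B's closed form, for every starting root.
lemma pvLoopA_eq_closed (root pitch : Int) :
    pvLoopA root pitch = root - 12 * max 0 (PySem.Int.floordiv (root - pitch + 11) 12) := by
  rw [PySem.Int.floordiv_eq_ediv_of_pos (by omega : (0:Int) < 12)]
  fun_induction pvLoopA root pitch with
  | case1 root h ih =>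
    omega
  | case2 root h =>
    omega

theorem tonality_to_root_note_spec : Claim_equal_tonality_to_root_note := by
  intro tonality pitch _ hpre
  unfold Pre_tonality_to_root_note pvPreCheck at hpre
  unfold Spec_tonality_to_root_note tonality_to_root_note tonality_to_root_note_alt
  cases h : PySem.Str.split? tonality "." with
  | none => rw [h] at hpre; simp at hpre
  | some l =>
    rw [h] at hpre
    match l with
    | [] => simp at hpre
    | [a] => simp at hpre
    | [a, b] =>
      simp only [pvLoopA_eq_closed, Option.getD_some, List.headD_cons]
      cases hg : PySem.Str.pyGet? a 0 with
      | none =>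
        have hA : a.toList = [] := by
          cases hA : a.toList with
          | nil => rfl
          | cons x xs => simp [PySem.Str.pyGet?, PySem.Chars.pyGet?, hA] at hg
        simp [hA] at hpre
      | some c => simp only [Option.elim]; rfl
    | a :: b :: c :: t => simp at hpre
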